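-- pv_equiv track=rewrite | github.com/varunvarunTM/Python | IIT-Madras-Datascience/Week 6/Mock/Q3.py | busy_cities
-- ===== SOURCE A (Python) =====
-- def group_by_city(scores_dataset):
--     """
--     Group students by cities
--
--     Argument:
--         scores_dataset: list of dicts
--     Return:
--         cities: dict: (key: string, value: list of strings)
--     """
--     cities = {}
--     for data in scores_dataset:
--         city = data['City']
--         name = data['Name']
--         if city in cities:
--             cities[city].append(name)
--         else:
--             cities[city] = [name]
--     return cities
--
-- def busy_cities(scores_dataset):
--     """
--     Get the busy cities
--
--     Argument:
--         scores_dataset: list of dicts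
--     Return:
--         result: list of strings
--     """
--     cities = group_by_city(scores_dataset)
--     busy_cities = []
--     max_students = 0
--     for city, students in cities.items():
--         num_students = len(students)
--         if num_students >= max_students:
--             if num_students > max_students:
--                 busy_cities = []
--             busy_cities.append(city)
--             max_students = num_students
--     return busy_cities
-- ===== SOURCE B (Python) =====
-- def busy_cities(scores_dataset):
--     """Two-phase: count students per city, then keep the cities hitting the max count."""
--     counts = {}
--     for data in scores_dataset:
--         city = data['City']
--         counts[city] = counts.get(city, 0) + 1
--     if not counts:
--         return []
--     max_count = max(counts.values())
--     return [city for city, c in counts.items() if c == max_count]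
-- ===== Notes on version B (the rewrite author's own statement) =====
-- stated objective: simpler
-- what changed: B replaces A's group-names-into-lists dict plus running-max/reset loop by a plain per-city counter followed by a two-phase max-then-filter over the counter in insertion order; the list of student names is never materialised.
-- crash fix: On datasets where every record has a 'City' key but some record lacks a 'Name' key, A raises KeyError while B (which never reads names) returns the busy cities of the counted records. — e.g. on busy_cities([[("City", "Delhi")]]): A raises KeyError, B returns ["Delhi"]
import Mathlib
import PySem

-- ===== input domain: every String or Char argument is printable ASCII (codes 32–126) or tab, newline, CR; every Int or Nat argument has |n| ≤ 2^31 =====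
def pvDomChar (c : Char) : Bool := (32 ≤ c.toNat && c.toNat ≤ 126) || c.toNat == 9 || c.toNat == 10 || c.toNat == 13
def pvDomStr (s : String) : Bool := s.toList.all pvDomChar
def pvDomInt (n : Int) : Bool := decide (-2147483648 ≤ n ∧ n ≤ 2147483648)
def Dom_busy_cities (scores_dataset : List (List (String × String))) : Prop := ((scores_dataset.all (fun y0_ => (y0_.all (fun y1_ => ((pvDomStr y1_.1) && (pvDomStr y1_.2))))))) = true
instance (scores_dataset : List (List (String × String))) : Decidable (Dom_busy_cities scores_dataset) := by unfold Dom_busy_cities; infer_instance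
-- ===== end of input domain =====

-- B replaces A's group-names-into-lists dict plus running-max/reset loop by a per-city counter
-- followed by a two-phase max-then-filter pass (objective: simpler).

-- ===== PORT A =====
-- data['City'] / data['Name']: first-match lookup in the record; total form, exact under Pre_ (key present)
def pvCity (data : List (String × String)) : String := ((PySem.Dict.mk data).get? "City").getD ""
def pvName (data : List (String × String)) : String := ((PySem.Dict.mk data).get? "Name").getD ""

-- helper group_by_city of A, transliterated
def group_by_city (scores_dataset : List (List (String × String))) : PySem.Dict String (List String) :=
  scores_dataset.foldl (fun cities data =>
    let city := pvCity data
    let name := pvName data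
    if cities.contains city then cities.modify city [] (· ++ [name])
    else cities.insert city [name]) PySem.Dict.empty

def busy_cities (scores_dataset : List (List (String × String))) : List String :=
  let cities := group_by_city scores_dataset
  let r := cities.items.foldl (fun (st : List String × Nat) cs =>
      let num := cs.2.length
      if num ≥ st.2 then ((if num > st.2 then ([] : List String) else st.1) ++ [cs.1], num) else st)
    (([] : List String), 0)
  r.1

-- ===== PORT B =====
def busy_cities_alt (scores_dataset : List (List (String × String))) : List String :=
  let counts : PySem.Dict String Int :=
    scores_dataset.foldl (fun counts data =>
      let city := pvCity data
      counts.insert city (counts.getD city 0 + 1)) PySem.Dict.empty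
  match PySem.List.max? counts.values (fun y => y) with   -- 'if not counts: return []' guard + 'max(counts.values())'
  | none => []
  | some m => (counts.items.filter (fun p => p.2 == m)).map (·.1)

-- ===== PRECONDITION & SPEC =====
-- Pre_ excludes records that lack a 'City' or 'Name' key (Python A raises KeyError there) and records
-- with duplicate keys (not a Python dict).
def Pre_busy_cities (scores_dataset : List (List (String × String))) : Prop :=
  ∀ data ∈ scores_dataset, (data.map Prod.fst).Nodup ∧
    (PySem.Dict.mk data).contains "City" = true ∧ (PySem.Dict.mk data).contains "Name" = true
instance (scores_dataset : List (List (String × String))) : Decidable (Pre_busy_cities scores_dataset) := by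
  unfold Pre_busy_cities; infer_instance

def pvWitness_busy_cities : (List (List (String × String))) :=
  [[("City", "Delhi"), ("Name", "Asha")], [("City", "Pune"), ("Name", "Ravi")], [("City", "Delhi"), ("Name", "Tara")]]

-- On datasets where every record has a 'City' key but some record lacks a 'Name' key, A raises KeyError
-- while B (which never reads names) returns the busy cities of the counted records.
def Raises_busy_cities (scores_dataset : List (List (String × String))) : Prop :=
  (∀ data ∈ scores_dataset, (data.map Prod.fst).Nodup ∧ (PySem.Dict.mk data).contains "City" = true) ∧
  (∃ data ∈ scores_dataset, (PySem.Dict.mk data).contains "Name" = false)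
instance (scores_dataset : List (List (String × String))) : Decidable (Raises_busy_cities scores_dataset) := by
  unfold Raises_busy_cities; infer_instance
def pvRaiseWitness_busy_cities : (List (List (String × String))) := [[("City", "Delhi")]]
def pvRaiseWitnessOut_busy_cities : List String := ["Delhi"]

def Spec_busy_cities (scores_dataset : List (List (String × String))) (out : List String) : Prop := out = busy_cities_alt scores_dataset
instance (scores_dataset : List (List (String × String))) (out : List String) : Decidable (Spec_busy_cities scores_dataset out) := by unfold Spec_busy_cities; infer_instance

-- ===== CLAIM (what is proved, stated in full; the proofs are below) =====
def Claim_equal_busy_cities : Prop := ∀ (scores_dataset : List (List (String × String))), Dom_busy_cities scores_dataset → Pre_busy_cities scores_dataset → Spec_busy_cities scores_dataset (busy_cities scores_dataset)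
def Claim_raises_busy_cities : Prop := (∀ (scores_dataset : List (List (String × String))), Dom_busy_cities scores_dataset → Raises_busy_cities scores_dataset → ¬ Pre_busy_cities scores_dataset) ∧ (Dom_busy_cities (pvRaiseWitness_busy_cities) ∧ Raises_busy_cities (pvRaiseWitness_busy_cities) ∧ busy_cities_alt (pvRaiseWitness_busy_cities) = pvRaiseWitnessOut_busy_cities)

-- ===== LEMMAS AND PROOFS =====

-- A's grouping dict is the uniform modify-fold over the (city, name) pairs
lemma group_eq (ds : List (List (String × String))) :
    group_by_city ds
      = (ds.map (fun data => (pvCity data, pvName data))).foldl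
          (fun d p => d.modify p.1 [] (· ++ [p.2])) PySem.Dict.empty := by
  unfold group_by_city
  rw [List.foldl_map]
  apply PySem.List.foldl_congr_mem
  intro d data _
  by_cases h : d.contains (pvCity data) = true
  · simp only [h, if_true]
  · simp only [eq_false_of_ne_true h]
    simp [PySem.Dict.modify, PySem.Dict.getD_of_not_contains d [] (eq_false_of_ne_true h)]

lemma group_keys (ds : List (List (String × String))) :
    (group_by_city ds).keys = PySem.Set.ofList (ds.map pvCity) := by
  rw [group_eq, List.foldl_map]
  rw [PySem.Dict.keys_foldl_modify_key ds (fun data => pvCity data) [] (fun d data v => v ++ [pvName data]) PySem.Dict.empty]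
  rfl

lemma group_nodup (ds : List (List (String × String))) : (group_by_city ds).keys.Nodup := by
  rw [group_eq, List.foldl_map]
  exact PySem.Dict.nodup_keys_foldl_modify_key ds (fun data => pvCity data) []
    (fun d data v => v ++ [pvName data]) PySem.Dict.empty (by simp [PySem.Dict.empty])

lemma group_getD_length (ds : List (List (String × String))) (c : String) :
    ((group_by_city ds).getD c []).length = (ds.map pvCity).count c := by
  rw [group_eq, PySem.Dict.getD_foldl_modify_append]
  simp [List.count_eq_countP, Function.comp_def, List.filter_map, List.countP_eq_length_filter]

-- B's counting dict is the counter of the city list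
lemma counts_eq (ds : List (List (String × String))) :
    ds.foldl (fun counts data =>
        let city := pvCity data
        counts.insert city (counts.getD city 0 + 1)) PySem.Dict.empty
      = PySem.Dict.counter (ds.map pvCity) := by
  rw [← PySem.Dict.foldl_insert_getD_add_one_eq_counter, List.foldl_map]

-- cast a running Nat max into Int
lemma foldl_max_cast (l : List Nat) : ∀ (a : Nat),
    (l.map (fun n : Nat => (n : Int))).foldl max ((a : Int)) = ((l.foldl max a : Nat) : Int) := by
  induction l with
  | nil => intro a; simp
  | cons x t ih =>
    intro a
    simp only [List.map_cons, List.foldl_cons, ← Nat.cast_max, ih]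

-- the A-loop over (key, name-list) pairs only sees list lengths
lemma A_loop_as_nat (items : List (String × List String)) :
    (items.foldl (fun (st : List String × Nat) cs =>
        let num := cs.2.length
        if num ≥ st.2 then ((if num > st.2 then ([] : List String) else st.1) ++ [cs.1], num) else st)
      (([] : List String), 0))
    = ((items.map (fun cs => (cs.1, cs.2.length))).foldl (fun (st : List String × Nat) cs =>
        if cs.2 ≥ st.2 then ((if cs.2 > st.2 then ([] : List String) else st.1) ++ [cs.1], cs.2) else st)
      (([] : List String), 0)) := by
  rw [List.foldl_map]

-- A's running-max/reset loop, characterised as a max-then-filter pass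
lemma loopA_char (ps : List (String × Nat)) : ∀ (acc : List String) (m : Nat),
    (ps.foldl (fun (st : List String × Nat) cs =>
        if cs.2 ≥ st.2 then ((if cs.2 > st.2 then ([] : List String) else st.1) ++ [cs.1], cs.2) else st)
      (acc, m)).1
    = (if ps.foldl (fun a p => Nat.max a p.2) m = m then acc else [])
      ++ (ps.filter (fun p => p.2 == ps.foldl (fun a p => Nat.max a p.2) m)).map (·.1) := by
  induction ps with
  | nil => intro acc m; simp
  | cons hd tl ih =>
    intro acc m
    obtain ⟨c, n⟩ := hd
    have hle : ∀ (m0 : Nat), m0 ≤ tl.foldl (fun a p => Nat.max a p.2) m0 :=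
      fun m0 => (PySem.List.le_foldl_max_nat tl (·.2) m0).1
    rw [List.foldl_cons, List.filter_cons,
      show List.foldl (fun a p => Nat.max a p.2) m ((c, n) :: tl)
        = List.foldl (fun a p => Nat.max a p.2) (Nat.max m n) tl from rfl]
    by_cases h1 : n > m
    · have hstep : (if (c, n).2 ≥ (acc, m).2 then
          ((if (c, n).2 > (acc, m).2 then ([] : List String) else (acc, m).1) ++ [(c, n).1], (c, n).2)
          else (acc, m)) = ([c], n) := by
        simp [h1, le_of_lt h1]
      have hmax : Nat.max m n = n := Nat.max_eq_right (le_of_lt h1)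
      rw [hstep, ih [c] n, hmax]
      have hMm : tl.foldl (fun a p => Nat.max a p.2) n ≠ m := by
        have := hle n; omega
      rw [if_neg hMm]
      by_cases h3 : tl.foldl (fun a p => Nat.max a p.2) n = n
      · rw [if_pos h3]; simp [h3]
      · rw [if_neg h3]
        have hb : ((c, n).2 == tl.foldl (fun a p => Nat.max a p.2) n) = false := by
          simp; omega
        simp [hb]
    · by_cases h2 : n ≥ m
      · have hnm : n = m := le_antisymm (by omega) h2
        subst hnm
        have hstep : (if (c, n).2 ≥ (acc, n).2 then
            ((if (c, n).2 > (acc, n).2 then ([] : List String) else (acc, n).1) ++ [(c, n).1], (c, n).2)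
            else (acc, n)) = (acc ++ [c], n) := by
          simp
        have hmax : Nat.max n n = n := Nat.max_self n
        rw [hstep, ih (acc ++ [c]) n, hmax]
        by_cases h3 : tl.foldl (fun a p => Nat.max a p.2) n = n
        · rw [if_pos h3, if_pos h3]
          have hb : ((c, n).2 == tl.foldl (fun a p => Nat.max a p.2) n) = true := by
            simp [h3]
          simp [hb]
        · rw [if_neg h3, if_neg h3]
          have hb : ((c, n).2 == tl.foldl (fun a p => Nat.max a p.2) n) = false := by
            simp; omega
          simp [hb]
      · have hstep : (if (c, n).2 ≥ (acc, m).2 then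
            ((if (c, n).2 > (acc, m).2 then ([] : List String) else (acc, m).1) ++ [(c, n).1], (c, n).2)
            else (acc, m)) = (acc, m) := by
          simp [h2]
        have hmax : Nat.max m n = m := Nat.max_eq_left (by omega)
        rw [hstep, ih acc m, hmax]
        have hb : ((c, n).2 == tl.foldl (fun a p => Nat.max a p.2) m) = false := by
          have := hle m; simp; omega
        simp [hb]

-- proof-side abbreviations: city list, distinct cities, per-city count, max count
def pvCnt (ds : List (List (String × String))) (k : String) : Nat := (ds.map pvCity).count k
def pvKeys (ds : List (List (String × String))) : List String := PySem.Set.ofList (ds.map pvCity)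
def pvMax (ds : List (List (String × String))) : Nat := ((pvKeys ds).map (pvCnt ds)).foldl max 0

lemma A_char (ds : List (List (String × String))) :
    busy_cities ds = (pvKeys ds).filter (fun k => pvCnt ds k == pvMax ds) := by
  have hitems : (group_by_city ds).items
      = (pvKeys ds).map (fun k => (k, (group_by_city ds).getD k [])) := by
    rw [PySem.Dict.items_eq_map_keys (group_by_city ds) (group_nodup ds) [], group_keys]; rfl
  show ((group_by_city ds).items.foldl (fun (st : List String × Nat) cs =>
      let num := cs.2.length
      if num ≥ st.2 then ((if num > st.2 then ([] : List String) else st.1) ++ [cs.1], num) else st)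
    (([] : List String), 0)).1 = _
  rw [A_loop_as_nat, hitems, List.map_map]
  have hfun : ((fun (cs : String × List String) => (cs.1, cs.2.length)) ∘
      (fun k => (k, (group_by_city ds).getD k []))) = fun k => (k, pvCnt ds k) := by
    funext k
    simp [Function.comp, group_getD_length, pvCnt]
  rw [hfun, loopA_char]
  have hM : ((pvKeys ds).map (fun k => (k, pvCnt ds k))).foldl (fun a p => Nat.max a p.2) 0
      = pvMax ds := by
    rw [List.foldl_map, pvMax, List.foldl_map]
  rw [hM]
  have hif : (if ((pvKeys ds).map (fun k => (k, pvCnt ds k))).foldl (fun a p => Nat.max a p.2) 0 = 0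
      then ([] : List String) else []) = [] := by split <;> rfl
  rw [hM] at hif
  rw [hif, List.nil_append, List.filter_map, List.map_map,
    show ((fun (x : String × Nat) => x.1) ∘ fun k => (k, pvCnt ds k)) = fun k => k from rfl,
    show ((fun (p : String × Nat) => p.2 == pvMax ds) ∘ fun k => (k, pvCnt ds k))
      = fun k => pvCnt ds k == pvMax ds from rfl, List.map_id']

lemma B_char (ds : List (List (String × String))) (k0 : String) (K' : List String)
    (hK : pvKeys ds = k0 :: K') :
    busy_cities_alt ds = (pvKeys ds).filter (fun k => pvCnt ds k == pvMax ds) := by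
  show (match PySem.List.max? (ds.foldl (fun (counts : PySem.Dict String Int) (data : List (String × String)) =>
      let city := pvCity data
      counts.insert city (counts.getD city 0 + 1)) PySem.Dict.empty).values (fun y => y) with
    | none => ([] : List String)
    | some m => (((ds.foldl (fun (counts : PySem.Dict String Int) (data : List (String × String)) =>
        let city := pvCity data
        counts.insert city (counts.getD city 0 + 1)) PySem.Dict.empty).items.filter
          (fun (p : String × Int) => p.2 == m)).map (fun (p : String × Int) => p.1))) = _
  rw [counts_eq ds]
  have hitems : (PySem.Dict.counter (ds.map pvCity)).items
      = (pvKeys ds).map (fun k => (k, (pvCnt ds k : Int))) := by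
    rw [PySem.Dict.items_counter]; rfl
  have hvals : (PySem.Dict.counter (ds.map pvCity)).values
      = ((pvKeys ds).map (pvCnt ds)).map (fun n : Nat => (n : Int)) := by
    show (PySem.Dict.counter (ds.map pvCity)).items.map (·.2) = _
    rw [hitems, List.map_map, List.map_map]
    rfl
  have hmax : PySem.List.max? (PySem.Dict.counter (ds.map pvCity)).values (fun y => y)
      = some ((pvMax ds : Nat) : Int) := by
    rw [hvals, hK, List.map_cons, List.map_cons, PySem.List.max?_id_cons, foldl_max_cast]
    have : (K'.map (pvCnt ds)).foldl max (pvCnt ds k0) = pvMax ds := by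
      rw [pvMax, hK, List.map_cons, List.foldl_cons, Nat.zero_max]
    rw [this]
  rw [hmax]
  show ((PySem.Dict.counter (ds.map pvCity)).items.filter
      (fun p => p.2 == ((pvMax ds : Nat) : Int))).map (·.1) = _
  rw [hitems, List.filter_map, List.map_map]
  have hfun : ((fun (p : String × Int) => p.2 == ((pvMax ds : Nat) : Int)) ∘
      (fun k => (k, (pvCnt ds k : Int)))) = fun k => pvCnt ds k == pvMax ds := by
    funext k
    by_cases h : pvCnt ds k = pvMax ds <;> simp [Function.comp, h]
  rw [hfun,
    show ((fun (x : String × Int) => x.1) ∘ fun k => (k, (pvCnt ds k : Int))) = fun k => k from rfl,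
    List.map_id']

lemma busy_cities_eq_alt (ds : List (List (String × String))) : busy_cities ds = busy_cities_alt ds := by
  cases ds with
  | nil => rfl
  | cons d0 dtl =>
    have hmem : pvCity d0 ∈ pvKeys (d0 :: dtl) := by
      rw [pvKeys, PySem.Set.mem_ofList]; simp
    have hne : pvKeys (d0 :: dtl) ≠ [] := by
      intro h; rw [h] at hmem; simp at hmem
    obtain ⟨k0, K', hK⟩ := List.exists_cons_of_ne_nil hne
    rw [A_char, B_char (d0 :: dtl) k0 K' hK]

-- ===== VERDICT (by name: the statement is the Claim_ definition above) =====
theorem busy_cities_spec : Claim_equal_busy_cities := by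
  intro ds _ _
  exact busy_cities_eq_alt ds

theorem busy_cities_raises : Claim_raises_busy_cities := by
  unfold Claim_raises_busy_cities
  exact ⟨by
    intro ds _ hr hp
    obtain ⟨-, d, hd, hn⟩ := hr
    exact absurd (hp d hd).2.2 (by simp [hn]), by decide⟩

-- self-check: the raise witness really lies inside Raises_ (extracted from the theorem above)
theorem pvRaiseWitness_busy_cities_ok : Raises_busy_cities pvRaiseWitness_busy_cities :=
  busy_cities_raises.2.2.1
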